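-- pv_equiv track=rewrite | github.com/2023-ssafy-study/Problem-Solving | wonkyoung/Programmers/level 3/불량_사용자.py | solution
-- ===== SOURCE A (Python) =====
-- def solution(user_id, banned_id):
--     n, m = len(user_id), len(banned_id)
--     # 제외 아이디와 매칭되는 아이디 인덱스
--     candidate = [[] for _ in range(m)]
--     # 아이디 목록을 체크할 리스트
--     answer_check = [False] * (1 << n)
--
--     # 제외 아이디별
--     for i in range(m):
--         target = banned_id[i]
--         l = len(target)
--         # 모든 아이디
--         for j in range(n):
--             ref = user_id[j]
--             if len(ref) == l:
--                 # 각 요소 비교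
--                 for k in range(l):
--                     if target[k] != ref[k] and target[k] != '*':
--                         break
--                 else:
--                     candidate[i].append(j)
--
--     # level: banned_id 인덱스, result: 비트마스킹 이용한 아이디 정보
--     def choose_id(level, result):
--
--         if level == m:
--             answer_check[result] = True
--             return
--
--         for i in candidate[level]:
--             if not (result & (1 << i)):
--                 choose_id(level + 1, result | 1 << i)
--
--     choose_id(0, 0)
--
--     return answer_check.count(True)
-- ===== SOURCE B (Python) =====
-- def solution(user_id, banned_id):
--     n = len(user_id)
--     masks = {0}
--     for b in banned_id:
--         cand = [j for j in range(n)
--                 if len(user_id[j]) == len(b)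
--                 and all(bc == '*' or bc == uc for bc, uc in zip(b, user_id[j]))]
--         masks = {mk | (1 << j) for mk in masks for j in cand if not mk & (1 << j)}
--     return len(masks)
-- ===== Notes on version B (the rewrite author's own statement) =====
-- stated objective: faster
-- what changed: A enumerates every assignment by DFS recursion, marking hits in a 2^n boolean array and counting; B does a level-by-level breadth-first pass keeping only the SET of distinct partial bitmasks per banned id, so duplicate subtrees are never re-explored and no 2^n array is allocated.
import Mathlib
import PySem

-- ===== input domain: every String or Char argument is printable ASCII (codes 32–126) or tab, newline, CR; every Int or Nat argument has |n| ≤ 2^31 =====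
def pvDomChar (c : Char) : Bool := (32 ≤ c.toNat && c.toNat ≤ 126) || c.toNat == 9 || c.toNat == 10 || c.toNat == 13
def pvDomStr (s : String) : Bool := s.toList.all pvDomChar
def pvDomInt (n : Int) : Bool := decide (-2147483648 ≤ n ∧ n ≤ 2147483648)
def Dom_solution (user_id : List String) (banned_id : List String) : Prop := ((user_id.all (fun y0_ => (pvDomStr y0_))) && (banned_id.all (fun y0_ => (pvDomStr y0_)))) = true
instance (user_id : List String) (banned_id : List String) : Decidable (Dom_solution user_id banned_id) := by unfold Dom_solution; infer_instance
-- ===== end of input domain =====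

-- B replaces A's DFS over all assignments (which marks hits in a 2^n boolean array) by a
-- level-by-level pass keeping only the set of distinct partial bitmasks, intended to be faster.

-- ===== PORT A =====
-- the inner `for k in range(l): if target[k] != ref[k] and target[k] != '*': break / else:` loop,
-- walked over the two character lists (only called with equal lengths)
def matchA : List Char → List Char → Bool
  | t :: ts, r :: rs => if t != r && t != '*' then false else matchA ts rs
  | _, _ => true

-- `for j in range(n): ...` building candidate[i] (list indexing is in range since j < n;
-- getD is exact there)
def candA (user_id : List String) (b : String) : List Nat :=
  (List.range user_id.length).foldl (fun acc j =>
    let ref := user_id.getD j ""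
    if ref.toList.length == b.toList.length then
      if matchA b.toList ref.toList then acc ++ [j] else acc
    else acc) []

-- the recursive `choose_id(level, result)` mutating answer_check; the remaining candidate lists
-- stand for `level`, `List.set` is exact since `result < 2^n` at every reached state
def chooseId (cands : List (List Nat)) (result : Nat) (ac : List Bool) : List Bool :=
  match cands with
  | [] => ac.set result true
  | c :: rest =>
      c.foldl (fun acc i =>
        if result &&& (1 <<< i) == 0 then chooseId rest (result ||| (1 <<< i)) acc else acc) ac

def solution (user_id : List String) (banned_id : List String) : Int :=
  let n := user_id.length
  let candidate := banned_id.map (fun b => candA user_id b)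
  let answer_check := List.replicate (1 <<< n) false
  let final := chooseId candidate 0 answer_check
  (final.count true : Int)

-- ===== PORT B =====
def matchB (b u : String) : Bool :=
  b.toList.length == u.toList.length &&
    (b.toList.zip u.toList).all (fun p => p.1 == '*' || p.1 == p.2)

def candB (user_id : List String) (n : Nat) (b : String) : List Nat :=
  (List.range n).filter (fun j => matchB b (user_id.getD j ""))

-- one step of the loop: the set comprehension over the current set of masks
def stepB (user_id : List String) (n : Nat) (S : PySem.Set Nat) (b : String) : PySem.Set Nat :=
  let cand := candB user_id n b
  PySem.Set.ofList (S.flatMap (fun mk =>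
    (cand.filter (fun j => mk &&& (1 <<< j) == 0)).map (fun j => mk ||| (1 <<< j))))

def solution_alt (user_id : List String) (banned_id : List String) : Int :=
  let n := user_id.length
  let masks := banned_id.foldl (stepB user_id n) (PySem.Set.ofList [0])
  (masks.length : Int)

-- ===== PRECONDITION & SPEC =====
def Spec_solution (user_id : List String) (banned_id : List String) (out : Int) : Prop := out = solution_alt user_id banned_id
instance (user_id : List String) (banned_id : List String) (out : Int) : Decidable (Spec_solution user_id banned_id out) := by unfold Spec_solution; infer_instance

-- ===== CLAIM (what is proved, stated in full; the proofs are below) =====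
def Claim_equal_solution : Prop := ∀ (user_id : List String) (banned_id : List String), Dom_solution user_id banned_id → Spec_solution user_id banned_id (solution user_id banned_id)

-- ===== LEMMAS AND PROOFS =====

-- the multiset of final masks A's DFS reaches from `result` through the remaining candidate lists
def reachR : List (List Nat) → Nat → List Nat
  | [], result => [result]
  | c :: rest, result =>
      c.flatMap (fun i => if result &&& (1 <<< i) == 0 then reachR rest (result ||| (1 <<< i)) else [])

theorem matchA_eq_zip_all : ∀ (ts rs : List Char), ts.length = rs.length →
    matchA ts rs = (ts.zip rs).all (fun p => p.1 == '*' || p.1 == p.2) := by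
  intro ts
  induction ts with
  | nil => intro rs h; cases rs <;> simp_all [matchA]
  | cons t ts ih =>
    intro rs h
    cases rs with
    | nil => simp at h
    | cons r rs =>
      simp only [List.length_cons, Nat.add_right_cancel_iff] at h
      simp only [matchA, List.zip_cons_cons, List.all_cons, ih rs h]
      by_cases h1 : t = r <;> by_cases h2 : t = '*' <;> simp [h1, h2]

theorem count_true_eq (l : List Bool) :
    l.count true = (List.range l.length).countP (fun x => l.getD x false) := by
  induction l with
  | nil => rfl
  | cons a l ih =>
    simp only [List.count_cons, List.length_cons, List.range_succ_eq_map, List.countP_cons,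
      List.countP_map]
    simp only [List.getD_cons_zero, List.getD_cons_succ, Function.comp_def, ih]
    cases a <;> simp [Nat.add_comm]

theorem branch_eq (b u : String) (acc : List Nat) (j : Nat) :
    (if u.toList.length == b.toList.length then
       (if matchA b.toList u.toList then acc ++ [j] else acc) else acc)
    = if matchB b u then acc ++ [j] else acc := by
  by_cases hl : u.toList.length = b.toList.length
  · rw [matchA_eq_zip_all b.toList u.toList hl.symm]
    simp [matchB, hl]
  · simp only [String.length_toList] at hl
    simp [matchB, hl, Ne.symm hl]

theorem candA_eq_candB (user_id : List String) (b : String) :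
    candA user_id b = candB user_id user_id.length b := by
  unfold candA candB
  have h := PySem.List.foldl_append_if (fun j => matchB b (user_id.getD j "")) id
      (List.range user_id.length) []
  rw [List.map_id, List.nil_append] at h
  rw [← h]
  apply PySem.List.foldl_congr_mem
  intro acc j hj
  exact branch_eq b (user_id.getD j "") acc j

theorem chooseId_length : ∀ (cands : List (List Nat)) (result : Nat) (ac : List Bool),
    (chooseId cands result ac).length = ac.length := by
  intro cands
  induction cands with
  | nil => intro result ac; simp [chooseId]
  | cons c rest ih =>
    intro result ac
    simp only [chooseId]
    induction c generalizing ac with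
    | nil => simp
    | cons i is ihc =>
      simp only [List.foldl_cons]
      rw [ihc]
      by_cases h : result &&& (1 <<< i) = 0 <;> simp [h, ih]

theorem chooseId_getD : ∀ (cands : List (List Nat)) (result : Nat) (ac : List Bool) (x : Nat),
    (∀ y ∈ reachR cands result, y < ac.length) →
    (chooseId cands result ac).getD x false
      = (ac.getD x false || decide (x ∈ reachR cands result)) := by
  intro cands
  induction cands with
  | nil =>
    intro result ac x hb
    simp only [reachR, List.mem_singleton] at hb ⊢
    have hr : result < ac.length := hb result rfl
    simp only [chooseId, List.getD, List.getElem?_set]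
    by_cases hx : result = x
    · subst hx; simp [hr]
    · simp [hx, Ne.symm hx]
  | cons c rest ih =>
    intro result ac x hb
    simp only [chooseId, reachR] at hb ⊢
    induction c generalizing ac with
    | nil => simp
    | cons i is ihc =>
      simp only [List.foldl_cons, List.flatMap_cons, List.mem_append] at hb ⊢
      set g := (if result &&& (1 <<< i) == 0 then chooseId rest (result ||| (1 <<< i)) ac else ac)
        with hg
      have hglen : g.length = ac.length := by
        rw [hg]; by_cases h : result &&& (1 <<< i) = 0 <;> simp [h, chooseId_length]
      have hgval : g.getD x false
          = (ac.getD x false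
             || decide (x ∈ if result &&& (1 <<< i) == 0
                 then reachR rest (result ||| (1 <<< i)) else [])) := by
        rw [hg]
        by_cases h : result &&& (1 <<< i) = 0
        · simp only [h, beq_self_eq_true, if_true]
          exact ih (result ||| (1 <<< i)) ac x (fun y hy => hb y (Or.inl (by simp [h, hy])))
        · have : (result &&& (1 <<< i) == 0) = false := by simpa using h
          simp [this]
      rw [ihc]
      · rw [hgval]
        simp [Bool.or_assoc]
      · intro y hy
        rw [hglen]; exact hb y (Or.inr hy)

theorem reachR_lt (n : Nat) : ∀ (cands : List (List Nat)) (result : Nat),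
    result < 2 ^ n → (∀ c ∈ cands, ∀ i ∈ c, i < n) →
    ∀ y ∈ reachR cands result, y < 2 ^ n := by
  intro cands
  induction cands with
  | nil => intro result hr _ y hy; simp [reachR] at hy; omega
  | cons c rest ih =>
    intro result hr hc y hy
    simp only [reachR, List.mem_flatMap] at hy
    obtain ⟨i, hi, hyi⟩ := hy
    by_cases h : result &&& (1 <<< i) = 0
    · simp only [h] at hyi
      simp at hyi
      refine ih (result ||| (1 <<< i)) ?_ (fun c' hc' => hc c' (List.mem_cons_of_mem _ hc')) y hyi
      have hin : i < n := hc c (List.mem_cons_self) i hi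
      have h1 : (1 <<< i) < 2 ^ n := by
        rw [Nat.one_shiftLeft]
        exact Nat.pow_lt_pow_right (by omega) hin
      exact Nat.or_lt_two_pow hr h1
    · have : (result &&& 1 <<< i == 0) = false := by simpa using h
      simp [this] at hyi

theorem foldB_mem (user_id : List String) (n : Nat) :
    ∀ (bs : List String) (S : PySem.Set Nat) (x : Nat),
    x ∈ bs.foldl (stepB user_id n) S ↔ ∃ m ∈ S, x ∈ reachR (bs.map (candB user_id n)) m := by
  intro bs
  induction bs with
  | nil =>
    intro S x
    simp [reachR]
  | cons b bs ih =>
    intro S x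
    simp only [List.foldl_cons, List.map_cons, ih]
    constructor
    · rintro ⟨m', hm', hx⟩
      simp only [stepB, PySem.Set.mem_ofList, List.mem_flatMap, List.mem_map,
        List.mem_filter] at hm'
      obtain ⟨mk, hmk, j, ⟨hj, hfree⟩, rfl⟩ := hm'
      refine ⟨mk, hmk, ?_⟩
      simp only [reachR, List.mem_flatMap]
      exact ⟨j, hj, by simp only [hfree, if_true]; exact hx⟩
    · rintro ⟨m, hm, hx⟩
      simp only [reachR, List.mem_flatMap] at hx
      obtain ⟨j, hj, hxj⟩ := hx
      by_cases hfree : m &&& (1 <<< j) = 0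
      · simp only [hfree] at hxj
        simp at hxj
        refine ⟨m ||| (1 <<< j), ?_, hxj⟩
        simp only [stepB, PySem.Set.mem_ofList, List.mem_flatMap, List.mem_map, List.mem_filter]
        exact ⟨m, hm, j, ⟨hj, by simpa using hfree⟩, rfl⟩
      · have : (m &&& 1 <<< j == 0) = false := by simpa using hfree
        simp [this] at hxj

theorem foldB_nodup (user_id : List String) (n : Nat) :
    ∀ (bs : List String) (S : PySem.Set Nat), S.Nodup → (bs.foldl (stepB user_id n) S).Nodup := by
  intro bs
  induction bs with
  | nil => intro S h; exact h
  | cons b bs ih =>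
    intro S h
    exact ih _ (PySem.Set.nodup_ofList _)

-- ===== VERDICT (by name: the statement is the Claim_ definition above) =====
theorem solution_spec : Claim_equal_solution := by
  intro user_id banned_id _
  unfold Spec_solution solution solution_alt
  simp only []
  set n := user_id.length with hn
  set cands := banned_id.map (fun b => candB user_id n b) with hcands
  have hmap : banned_id.map (fun b => candA user_id b) = cands := by
    rw [hcands]
    exact List.map_congr_left (fun b _ => candA_eq_candB user_id b)
  have hcbound : ∀ c ∈ cands, ∀ i ∈ c, i < n := by
    intro c hc i hi
    rw [hcands] at hc
    obtain ⟨b, _, rfl⟩ := List.mem_map.mp hc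
    have := List.mem_filter.mp hi
    simpa using this.1
  have hRlt : ∀ y ∈ reachR cands 0, y < 2 ^ n :=
    reachR_lt n cands 0 (Nat.two_pow_pos n) hcbound
  rw [hmap, Nat.one_shiftLeft]
  -- A's side: the count of true entries is the number of masks in range that A's DFS reaches
  have hlen : (chooseId cands 0 (List.replicate (2 ^ n) false)).length = 2 ^ n := by
    rw [chooseId_length]; simp
  rw [count_true_eq, hlen]
  have hget : ∀ x, (chooseId cands 0 (List.replicate (2 ^ n) false)).getD x false
      = decide (x ∈ reachR cands 0) := by
    intro x
    rw [chooseId_getD _ _ _ _ (by intro y hy; simpa using hRlt y hy)]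
    have hrep : (List.replicate (2 ^ n) false).getD x false = false := by
      by_cases hx : x < 2 ^ n
      · exact List.getD_replicate false hx
      · apply List.getD_eq_default
        simpa using Nat.le_of_not_lt hx
    rw [hrep, Bool.false_or]
  have hA : (List.range (2 ^ n)).countP
        (fun x => (chooseId cands 0 (List.replicate (2 ^ n) false)).getD x false)
      = ((List.range (2 ^ n)).filter (fun x => decide (x ∈ reachR cands 0))).length := by
    rw [List.countP_congr (fun x _ => by rw [hget x]), List.countP_eq_length_filter]
  rw [hA]
  -- B's side: the final set holds exactly the reachable masks, without duplicates
  have hBmem : ∀ x, x ∈ banned_id.foldl (stepB user_id n) (PySem.Set.ofList [0])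
      ↔ x ∈ reachR cands 0 := by
    intro x
    rw [foldB_mem, ← hcands]
    constructor
    · rintro ⟨m, hm, hx⟩
      have : m = 0 := by simpa [PySem.Set.mem_ofList] using hm
      rwa [this] at hx
    · intro hx
      exact ⟨0, by simp [PySem.Set.mem_ofList], hx⟩
  have hperm : ((List.range (2 ^ n)).filter (fun x => decide (x ∈ reachR cands 0))).Perm
      (banned_id.foldl (stepB user_id n) (PySem.Set.ofList [0])) := by
    rw [List.perm_ext_iff_of_nodup (List.nodup_range.filter _)
      (foldB_nodup user_id n banned_id _ (PySem.Set.nodup_ofList _))]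
    intro a
    rw [hBmem, List.mem_filter]
    simp only [List.mem_range, decide_eq_true_eq]
    exact ⟨fun h => h.2, fun h => ⟨hRlt a h, h⟩⟩
  rw [hperm.length_eq]
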